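-- pv_equiv track=rewrite | github.com/neumond/word-sum-rebus | pick.py | iter_patterns
-- ===== SOURCE A (Python) =====
-- def swap_pattern(p):
--     return ''.join(
--         f'{b}{a}{s}'
--         for a, b, s in zip(p[::3], p[1::3], p[2::3])
--     )
--
-- def iter_patterns(max_n, prefix=''):
--     if max_n < 1:
--         return
--     letters = 'ABCDEFGHIJ'
--     # a + b = c; [a, b, c]
--     max_letters = [
--         min(tidx + len(prefix) + 1, len(letters))
--         for tidx in range(3)
--     ]
--     for l1 in range(max_letters[0]):
--         for l2 in range(max_letters[1]):
--             for l3 in range(max_letters[2]):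
--                 val = f'{prefix}{letters[l1]}{letters[l2]}{letters[l3]}'
--                 sw_val = swap_pattern(val)
--                 if sw_val >= val:
--                     yield val
--                     yield from iter_patterns(max_n - 1, val)
-- ===== SOURCE B (Python) =====
-- def swap_pattern(p):
--     return ''.join(
--         f'{b}{a}{s}'
--         for a, b, s in zip(p[::3], p[1::3], p[2::3])
--     )
--
-- def _candidates(prefix):
--     letters = 'ABCDEFGHIJ'
--     max_letters = [min(tidx + len(prefix) + 1, len(letters)) for tidx in range(3)]
--     out = []
--     for l1 in range(max_letters[0]):
--         for l2 in range(max_letters[1]):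
--             for l3 in range(max_letters[2]):
--                 val = prefix + letters[l1] + letters[l2] + letters[l3]
--                 if swap_pattern(val) >= val:
--                     out.append(val)
--     return out
--
-- def iter_patterns(max_n, prefix=''):
--     # iterative pre-order DFS with an explicit stack instead of recursion
--     if max_n < 1:
--         return
--     stack = [(v, max_n - 1) for v in reversed(_candidates(prefix))]
--     while stack:
--         val, n = stack.pop()
--         yield val
--         if n >= 1:
--             for child in reversed(_candidates(val)):
--                 stack.append((child, n - 1))
-- ===== Notes on version B (the rewrite author's own statement) =====
-- stated objective: alternative
-- what changed: Replaced the recursive generator by an iterative pre-order DFS: an explicit stack of (pattern, remaining-depth) frames, seeded and extended with the per-level candidate list pushed in reverse so the original yield order is reproduced exactly.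
import Mathlib
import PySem

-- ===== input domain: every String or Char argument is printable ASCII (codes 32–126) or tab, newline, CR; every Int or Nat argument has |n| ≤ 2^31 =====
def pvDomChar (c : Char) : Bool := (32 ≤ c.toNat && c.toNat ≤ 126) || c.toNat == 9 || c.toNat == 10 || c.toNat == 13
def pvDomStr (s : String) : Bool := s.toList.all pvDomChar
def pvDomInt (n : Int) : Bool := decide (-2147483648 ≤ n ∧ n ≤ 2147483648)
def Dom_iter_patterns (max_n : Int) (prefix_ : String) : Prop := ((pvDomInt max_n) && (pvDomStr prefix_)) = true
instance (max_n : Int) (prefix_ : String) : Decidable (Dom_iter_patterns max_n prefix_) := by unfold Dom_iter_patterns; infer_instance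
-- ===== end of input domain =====

-- B replaces A's recursive generator by an iterative pre-order DFS over an explicit stack
-- of (pattern, remaining-depth) frames; same yield sequence, same cost (objective: alternative).

-- ===== PORT A =====
-- swap_pattern: module helper shared verbatim by A and by B (Source B keeps it unchanged).
-- p[::3], p[1::3], p[2::3] are PySem.List.slice? with literal step 3 ≠ 0, so the result is
-- always `some` and `.getD []` never supplies the default; zip-of-three is two List.zip.
def swap_pattern (p : List Char) : List Char :=
  ((((PySem.List.slice? p none none 3).getD []).zip
      ((PySem.List.slice? p (some 1) none 3).getD [])).zip
      ((PySem.List.slice? p (some 2) none 3).getD [])).flatMap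
    (fun t => [t.1.2, t.1.1, t.2])

-- A, literally: the generator's yields collected in order.  letters[l] uses pyGetD: the
-- index is always < min(…, 10) ≤ length letters, so the default 'A' is never used.
-- Python's `sw_val >= val` on str is `¬ (sw_val < val)` code-point lexicographically,
-- i.e. `PySem.Chars.strLt sw_val val = false`.
def iter_patterns (max_n : Int) (prefix_ : String) : List String :=
  if h : max_n < 1 then []
  else
    let letters : List Char := "ABCDEFGHIJ".toList
    let max_letters : List Int :=
      (PySem.List.pyRange 0 3).map
        (fun tidx => min (tidx + PySem.Str.len prefix_ + 1) (letters.length : Int))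
    (PySem.List.pyRange 0 (PySem.List.pyGetD max_letters 0 0)).foldl (fun acc1 l1 =>
      (PySem.List.pyRange 0 (PySem.List.pyGetD max_letters 1 0)).foldl (fun acc2 l2 =>
        (PySem.List.pyRange 0 (PySem.List.pyGetD max_letters 2 0)).foldl (fun acc3 l3 =>
          let val : List Char := prefix_.toList ++
            [PySem.List.pyGetD letters l1 'A', PySem.List.pyGetD letters l2 'A',
             PySem.List.pyGetD letters l3 'A']
          let sw_val := swap_pattern val
          if PySem.Chars.strLt sw_val val = false then
            (acc3 ++ [String.ofList val]) ++ iter_patterns (max_n - 1) (String.ofList val)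
          else acc3) acc2) acc1) []
termination_by max_n.toNat
decreasing_by omega

-- ===== PORT B =====
-- _candidates from Source B: one level of the search, the `out.append(val)` loop.
def pv_candidates (prefix_ : String) : List String :=
  let letters : List Char := "ABCDEFGHIJ".toList
  let max_letters : List Int :=
    (PySem.List.pyRange 0 3).map
      (fun tidx => min (tidx + PySem.Str.len prefix_ + 1) (letters.length : Int))
  (PySem.List.pyRange 0 (PySem.List.pyGetD max_letters 0 0)).foldl (fun out1 l1 =>
    (PySem.List.pyRange 0 (PySem.List.pyGetD max_letters 1 0)).foldl (fun out2 l2 =>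
      (PySem.List.pyRange 0 (PySem.List.pyGetD max_letters 2 0)).foldl (fun out3 l3 =>
        let val : List Char := prefix_.toList ++
          [PySem.List.pyGetD letters l1 'A', PySem.List.pyGetD letters l2 'A',
           PySem.List.pyGetD letters l3 'A']
        if PySem.Chars.strLt (swap_pattern val) val = false then out3 ++ [String.ofList val]
        else out3) out2) out1) []

-- termination helper for pv_loop (cited in its decreasing_by): one level yields ≤ 1000 frames
lemma pv_foldl_length_le {α β : Type} (l : List α) (F : List β → α → List β) (K : Nat)
    (h : ∀ acc x, (F acc x).length ≤ acc.length + K) :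
    ∀ acc : List β, (l.foldl F acc).length ≤ acc.length + l.length * K := by
  induction l with
  | nil => simp
  | cons a t ih =>
      intro acc
      calc ((a :: t).foldl F acc).length ≤ (F acc a).length + t.length * K := ih _
        _ ≤ acc.length + K + t.length * K := by have := h acc a; omega
        _ = acc.length + (a :: t).length * K := by simp [List.length_cons]; ring

lemma pv_candidates_length_le (p : String) : (pv_candidates p).length ≤ 1000 := by
  have hgetD : ∀ (xs : List Int) (i : Int), (∀ v ∈ xs, v ≤ 10) → PySem.List.pyGetD xs i 0 ≤ 10 := by
    intro xs i hxs
    simp only [PySem.List.pyGetD]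
    cases h : PySem.List.pyGet? xs i with
    | none => simp
    | some v => simpa using hxs v (PySem.List.mem_of_pyGet?_eq_some _ h)
  have hrange : ∀ m : Int, m ≤ 10 → (PySem.List.pyRange 0 m).length ≤ 10 := by
    intro m hm
    rw [PySem.List.length_pyRange_one]
    omega
  have h3 : PySem.List.pyRange 0 3 = [0, 1, 2] := by decide
  have h10 : (("ABCDEFGHIJ".toList.length : Nat) : Int) = 10 := by decide
  unfold pv_candidates
  rw [h3]
  simp only [List.map_cons, List.map_nil]
  have hml : ∀ v ∈ [min (0 + PySem.Str.len p + 1) ("ABCDEFGHIJ".toList.length : Int),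
      min (1 + PySem.Str.len p + 1) ("ABCDEFGHIJ".toList.length : Int),
      min (2 + PySem.Str.len p + 1) ("ABCDEFGHIJ".toList.length : Int)], v ≤ 10 := by
    intro v hv
    simp only [List.mem_cons, List.not_mem_nil, or_false] at hv
    rcases hv with h | h | h <;> omega
  refine le_trans (pv_foldl_length_le _ _ 100 (fun acc x => ?_) []) ?_
  · refine le_trans (pv_foldl_length_le _ _ 10 (fun acc2 x2 => ?_) acc) ?_
    · refine le_trans (pv_foldl_length_le _ _ 1 (fun acc3 x3 => ?_) acc2) ?_
      · dsimp only
        split <;> simp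
      · have := hrange _ (hgetD _ 2 hml)
        omega
    · have := hrange _ (hgetD _ 1 hml)
      omega
  · have := hrange _ (hgetD _ 0 hml)
    simp only [List.length_nil]
    omega

-- the explicit stack: list head = stack top (Source B pushes reversed(children) and pops from
-- the end; prepending the children in order is the same LIFO discipline).
def pv_loop (stack : List (String × Int)) : List String :=
  match stack with
  | [] => []
  | (val, n) :: rest =>
      if h : 1 ≤ n then
        val :: pv_loop ((pv_candidates val).map (fun c => (c, n - 1)) ++ rest)
      else
        val :: pv_loop rest
termination_by (stack.map (fun f => 1001 ^ f.2.toNat)).sum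
decreasing_by
  · simp only [List.map_append, List.map_map, List.map_cons, List.sum_append, List.sum_cons,
      Function.comp_def]
    have hc : ((pv_candidates val).map (fun _ => 1001 ^ (n - 1).toNat)).sum
        = (pv_candidates val).length * 1001 ^ (n - 1).toNat := by
      simp [List.map_const', List.sum_replicate, smul_eq_mul]
    rw [hc]
    have hlen := pv_candidates_length_le val
    have hpow : (pv_candidates val).length * 1001 ^ (n - 1).toNat < 1001 ^ n.toNat := by
      have hn : n.toNat = (n - 1).toNat + 1 := by omega
      rw [hn, pow_succ]
      have hpos : 0 < 1001 ^ (n - 1).toNat := pow_pos (by omega : (0:Nat) < 1001) _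
      calc (pv_candidates val).length * 1001 ^ (n - 1).toNat
          ≤ 1000 * 1001 ^ (n - 1).toNat := Nat.mul_le_mul_right _ hlen
        _ < 1001 ^ (n - 1).toNat * 1001 := by omega
    omega
  · simp only [List.map_cons, List.sum_cons]
    have hpos : 0 < 1001 ^ n.toNat := pow_pos (by omega : (0:Nat) < 1001) _
    omega

-- iter_patterns from Source B: seed the stack with the first level, then run the DFS loop.
def iter_patterns_alt (max_n : Int) (prefix_ : String) : List String :=
  if max_n < 1 then []
  else pv_loop ((pv_candidates prefix_).map (fun v => (v, max_n - 1)))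

-- ===== PRECONDITION & SPEC =====
def Spec_iter_patterns (max_n : Int) (prefix_ : String) (out : List String) : Prop := out = iter_patterns_alt max_n prefix_
instance (max_n : Int) (prefix_ : String) (out : List String) : Decidable (Spec_iter_patterns max_n prefix_ out) := by unfold Spec_iter_patterns; infer_instance

-- ===== CLAIM (what is proved, stated in full; the proofs are below) =====
def Claim_equal_iter_patterns : Prop := ∀ (max_n : Int) (prefix_ : String), Dom_iter_patterns max_n prefix_ → Spec_iter_patterns max_n prefix_ (iter_patterns max_n prefix_)

-- ===== LEMMAS AND PROOFS =====

-- lifting a fold on A-accumulators to a fold on candidate-accumulators through flatMap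
lemma foldl_flatMap_lift {α β γ : Type} (L : List α) (A : List γ → α → List γ)
    (C : List β → α → List β) (g : β → List γ)
    (h : ∀ (cacc : List β) (x : α), A (cacc.flatMap g) x = (C cacc x).flatMap g) :
    ∀ cacc : List β, L.foldl A (cacc.flatMap g) = (L.foldl C cacc).flatMap g := by
  induction L with
  | nil => intro _; rfl
  | cons a t ih =>
      intro cacc
      simp only [List.foldl_cons, h]
      exact ih _

-- A's recursion, one step, expressed through B's level function
lemma iter_patterns_eq_flatMap (n : Int) (p : String) :
    iter_patterns n p
      = if n < 1 then []
        else (pv_candidates p).flatMap (fun v => v :: iter_patterns (n - 1) v) := by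
  rw [iter_patterns]
  split
  · simp_all
  · rename_i h
    unfold pv_candidates
    dsimp only
    refine foldl_flatMap_lift _ _ _ _ (fun cacc1 l1 => ?_) []
    refine foldl_flatMap_lift _ _ _ _ (fun cacc2 l2 => ?_) cacc1
    refine foldl_flatMap_lift _ _ _ _ (fun cacc3 l3 => ?_) cacc2
    dsimp only
    split
    · simp [List.flatMap_append, List.append_assoc]
    · rfl

-- the stack loop computes, frame by frame, the pre-order listing A computes by recursion
lemma pv_loop_spec (stack : List (String × Int)) :
    pv_loop stack = stack.flatMap (fun f => f.1 :: iter_patterns f.2 f.1) := by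
  induction stack using pv_loop.induct with
  | case1 => rw [pv_loop]; rfl
  | case2 val n rest h ih =>
      rw [pv_loop]
      simp only [dif_pos h, ih, List.flatMap_append, List.flatMap_map, List.flatMap_cons]
      rw [iter_patterns_eq_flatMap n val, if_neg (by omega)]
      simp
  | case3 val n rest h ih =>
      rw [pv_loop]
      simp only [dif_neg h, ih, List.flatMap_cons]
      rw [iter_patterns_eq_flatMap n val, if_pos (by omega)]
      rfl

-- ===== VERDICT (by name: the statement is the Claim_ definition above) =====
theorem iter_patterns_spec : Claim_equal_iter_patterns := by
  intro max_n prefix_ _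
  unfold Spec_iter_patterns iter_patterns_alt
  rw [iter_patterns_eq_flatMap]
  split
  · rfl
  · rw [pv_loop_spec, List.flatMap_map]
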